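-- pv_equiv track=rewrite | github.com/Noam-Shamir-1/AI---GBFS-Search-Algorithm | ex1 (7).py | is_vaild_action
-- ===== SOURCE A (Python) =====
-- def is_vaild_action(actions):
--     # check if 2 drones try to pickup the same package
--     temp = []
--     for row in actions:
--         row_flag = True
--         to_pick_up = set()
--         for act in row:
--             if act[0] == "pick up":
--                 if act[2] not in to_pick_up:
--                     to_pick_up.add(act[2])
--                 else:
--                     row_flag = False
--                     break
--         if row_flag:
--             temp.append(row)
--     return tuple(temp)
-- ===== SOURCE B (Python) =====
-- def is_vaild_action(actions):
--     def no_dup(row):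
--         ids = sorted(act[2] for act in row if act[0] == "pick up")
--         return all(x != y for x, y in zip(ids, ids[1:]))
--     return tuple(row for row in actions if no_dup(row))
-- ===== Notes on version B (the rewrite author's own statement) =====
-- stated objective: alternative
-- what changed: Replaces A's incremental hash-set membership loop with early break by a sort-based duplicate test: sort each row's pickup ids and declare the row valid iff no two adjacent sorted ids are equal, filtering rows with a comprehension.
import Mathlib
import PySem

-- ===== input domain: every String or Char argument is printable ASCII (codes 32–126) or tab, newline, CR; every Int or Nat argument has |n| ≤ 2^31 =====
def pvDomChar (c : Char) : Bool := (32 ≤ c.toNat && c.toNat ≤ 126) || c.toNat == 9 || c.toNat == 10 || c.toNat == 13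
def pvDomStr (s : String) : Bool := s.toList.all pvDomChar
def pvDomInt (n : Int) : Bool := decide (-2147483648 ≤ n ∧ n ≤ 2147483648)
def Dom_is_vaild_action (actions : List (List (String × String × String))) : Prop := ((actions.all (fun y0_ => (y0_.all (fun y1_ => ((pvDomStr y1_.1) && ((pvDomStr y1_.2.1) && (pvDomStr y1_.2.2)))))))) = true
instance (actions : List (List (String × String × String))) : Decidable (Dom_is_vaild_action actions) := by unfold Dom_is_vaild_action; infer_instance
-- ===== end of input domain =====

-- B replaces A's incremental set-membership loop with early break by sorting each row's
-- pickup ids and rejecting the row iff two adjacent sorted ids are equal (objective: alternative).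


-- ===== PORT A =====
-- inner 'for act in row' loop carrying the to_pick_up set; 'false' is the break+row_flag=False path
def pvRowLoopA : List (String × String × String) → PySem.Set String → Bool
  | [], _ => true
  | act :: rest, toPickUp =>
    if act.1 == "pick up" then
      if PySem.Set.contains toPickUp act.2.2 then false
      else pvRowLoopA rest (PySem.Set.add toPickUp act.2.2)
    else pvRowLoopA rest toPickUp

def is_vaild_action (actions : List (List (String × String × String))) : List (List (String × String × String)) :=
  actions.foldl (fun temp row => if pvRowLoopA row PySem.Set.empty then temp ++ [row] else temp) []

-- ===== PORT B =====
-- generator 'act[2] for act in row if act[0] == "pick up"'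
def pvPickups (row : List (String × String × String)) : List String :=
  (row.filter (fun act => act.1 == "pick up")).map (fun act => act.2.2)

-- ids = sorted(...); all(x != y for x, y in zip(ids, ids[1:]))
def pvNoDupB (row : List (String × String × String)) : Bool :=
  let ids := PySem.List.sorted (pvPickups row) (fun x => x) false
  (ids.zip (PySem.List.slice ids (some 1) none)).all (fun p => !(p.1 == p.2))

def is_vaild_action_alt (actions : List (List (String × String × String))) : List (List (String × String × String)) :=
  actions.filter pvNoDupB

-- ===== PRECONDITION & SPEC =====
def Spec_is_vaild_action (actions : List (List (String × String × String))) (out : List (List (String × String × String))) : Prop := out = is_vaild_action_alt actions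
instance (actions : List (List (String × String × String))) (out : List (List (String × String × String))) : Decidable (Spec_is_vaild_action actions out) := by unfold Spec_is_vaild_action; infer_instance

-- ===== CLAIM (what is proved, stated in full; the proofs are below) =====
def Claim_equal_is_vaild_action : Prop := ∀ (actions : List (List (String × String × String))), Dom_is_vaild_action actions → Spec_is_vaild_action actions (is_vaild_action actions)

-- ===== LEMMAS AND PROOFS =====

-- pvPickups unfolds one step
lemma pvPickups_cons (act : String × String × String) (rest : List (String × String × String)) :
    pvPickups (act :: rest) =
      if act.1 == "pick up" then act.2.2 :: pvPickups rest else pvPickups rest := by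
  simp only [pvPickups, List.filter_cons]
  split <;> simp

-- A's inner loop succeeds iff the remaining pickups are duplicate-free and fresh w.r.t. the set so far
lemma pvRowLoopA_iff (row : List (String × String × String)) :
    ∀ s : PySem.Set String,
      pvRowLoopA row s = true ↔ (pvPickups row).Nodup ∧ ∀ x ∈ pvPickups row, x ∉ s := by
  induction row with
  | nil => intro s; simp [pvRowLoopA, pvPickups]
  | cons act rest ih =>
    intro s
    rw [pvPickups_cons]
    by_cases h : (act.1 == "pick up") = true
    · rw [if_pos h]
      unfold pvRowLoopA
      rw [if_pos h]
      by_cases hmem : act.2.2 ∈ s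
      · rw [if_pos ((PySem.Set.contains_iff s act.2.2).mpr hmem)]
        constructor
        · intro hf
          exact absurd hf (by simp)
        · rintro ⟨_, hfresh⟩
          exact absurd hmem (hfresh act.2.2 List.mem_cons_self)
      · have hc : PySem.Set.contains s act.2.2 = false := by
          rw [Bool.eq_false_iff]
          intro hcc
          exact hmem ((PySem.Set.contains_iff s act.2.2).mp hcc)
        rw [if_neg (by rw [hc]; exact Bool.false_ne_true), ih]
        constructor
        · rintro ⟨hnd, hfresh⟩
          have hnin : act.2.2 ∉ pvPickups rest := by
            intro hin
            exact (hfresh act.2.2 hin) ((PySem.Set.mem_add s act.2.2 act.2.2).mpr (Or.inr rfl))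
          refine ⟨List.nodup_cons.mpr ⟨hnin, hnd⟩, ?_⟩
          intro y hy
          rcases List.mem_cons.mp hy with rfl | hy'
          · exact hmem
          · intro hys
            exact (hfresh y hy') ((PySem.Set.mem_add s act.2.2 y).mpr (Or.inl hys))
        · rintro ⟨hndc, hfresh⟩
          obtain ⟨hnin, hnd⟩ := List.nodup_cons.mp hndc
          refine ⟨hnd, ?_⟩
          intro y hy hymem
          rcases (PySem.Set.mem_add s act.2.2 y).mp hymem with hys | rfl
          · exact (hfresh y (List.mem_cons.mpr (Or.inr hy))) hys
          · exact hnin hy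
    · rw [if_neg h]
      unfold pvRowLoopA
      rw [if_neg h]
      exact ih s

-- the adjacent-pairs 'all' over zip l (tail l) is the chain of ≠ along l
lemma pvZipAll_chain' (l : List String) :
    ((l.zip l.tail).all (fun p => !(p.1 == p.2))) = true ↔ l.IsChain (· ≠ ·) := by
  induction l with
  | nil => simp
  | cons a t ih =>
    cases t with
    | nil => simp
    | cons b t' =>
      simp only [List.tail_cons, List.zip_cons_cons, List.all_cons, Bool.and_eq_true,
        List.isChain_cons_cons] at *
      rw [ih]
      simp

-- adjacent ≠ together with adjacent ≤ gives adjacent <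
lemma pvChainLt (l : List String) (h1 : l.IsChain (· ≠ ·)) (h2 : l.IsChain (· ≤ ·)) :
    l.IsChain (· < ·) := by
  induction l with
  | nil => simp
  | cons a t ih =>
    cases t with
    | nil => simp
    | cons b t' =>
      rw [List.isChain_cons_cons] at h1 h2 ⊢
      exact ⟨lt_of_le_of_ne h2.1 h1.1, ih h1.2 h2.2⟩

-- B's sorted-adjacent test is the Nodup test on the pickups
lemma pvNoDupB_iff (row : List (String × String × String)) :
    pvNoDupB row = true ↔ (pvPickups row).Nodup := by
  simp only [pvNoDupB, PySem.List.slice_from_one]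
  rw [pvZipAll_chain']
  have hperm := PySem.List.sorted_perm (xs := pvPickups row) (key := fun x => x) (rev := false)
  have hpw : (PySem.List.sorted (pvPickups row) (fun x => x) false).Pairwise (· ≤ ·) :=
    PySem.List.sorted_pairwise (xs := pvPickups row) (key := fun x => x)
  constructor
  · intro hch
    have hlt := pvChainLt _ hch hpw.isChain
    have hpwlt := (List.isChain_iff_pairwise).mp hlt
    exact hperm.nodup_iff.mp (hpwlt.imp ne_of_lt)
  · intro hnd
    exact (hperm.nodup_iff.mpr hnd).isChain

-- the two row predicates coincide
lemma pvRow_eq (row : List (String × String × String)) :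
    pvRowLoopA row PySem.Set.empty = pvNoDupB row := by
  rw [Bool.eq_iff_iff, pvRowLoopA_iff, pvNoDupB_iff]
  simp [PySem.Set.empty]

-- ===== VERDICT (by name: the statement is the Claim_ definition above) =====
theorem is_vaild_action_spec : Claim_equal_is_vaild_action := by
  intro actions _
  unfold Spec_is_vaild_action is_vaild_action is_vaild_action_alt
  rw [PySem.List.foldl_append_if]
  simpa using List.filter_congr (fun row _ => pvRow_eq row)
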